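-- pv_equiv track=rewrite | github.com/Shiv1909/WebScraping-Agent | pipeline/answer_generator.py | get_diverse_documents
-- ===== SOURCE A (Python) =====
-- from collections import defaultdict
--
-- def get_diverse_documents(scored_docs, min_required):
--     """
--     Ensure documents are picked from diverse URLs.
--     """
--     by_url = defaultdict(list)
--     for entry in scored_docs:
--         by_url[entry["url"]].append(entry)
--
--     diverse_docs = []
--     for entries in by_url.values():
--         if len(diverse_docs) >= min_required:
--             break
--         diverse_docs.append(entries[0])
--
--     return diverse_docs
-- ===== SOURCE B (Python) =====
-- def get_diverse_documents(scored_docs, min_required):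
--     """
--     Ensure documents are picked from diverse URLs.
--     """
--     if min_required <= 0 or not scored_docs:
--         return []
--     first, rest = scored_docs[0], scored_docs[1:]
--     remaining = [e for e in rest if e["url"] != first["url"]]
--     return [first] + get_diverse_documents(remaining, min_required - 1)
-- ===== Notes on version B (the rewrite author's own statement) =====
-- stated objective: alternative
-- what changed: Replaces the group-by-URL dict plus second selection loop with a select-and-filter recursion: take the first entry, filter out all later entries with the same URL, and recurse with min_required-1, so no dict or per-URL lists are ever built.
import Mathlib
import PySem

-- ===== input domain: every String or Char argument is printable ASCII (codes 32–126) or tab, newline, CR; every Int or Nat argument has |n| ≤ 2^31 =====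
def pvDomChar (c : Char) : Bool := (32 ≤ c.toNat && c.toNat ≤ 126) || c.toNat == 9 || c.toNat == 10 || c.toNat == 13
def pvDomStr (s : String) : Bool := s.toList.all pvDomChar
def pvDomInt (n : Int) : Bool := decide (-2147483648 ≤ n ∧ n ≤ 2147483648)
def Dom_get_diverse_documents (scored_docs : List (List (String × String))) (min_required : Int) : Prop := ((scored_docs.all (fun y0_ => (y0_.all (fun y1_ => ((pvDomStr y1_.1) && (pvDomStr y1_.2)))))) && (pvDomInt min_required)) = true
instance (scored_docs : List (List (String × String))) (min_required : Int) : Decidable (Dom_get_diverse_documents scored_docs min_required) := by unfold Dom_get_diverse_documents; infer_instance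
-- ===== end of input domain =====

-- B replaces A's group-by-URL dict plus second selection loop by a select-and-filter
-- recursion (take head, drop later same-URL entries, recurse with min_required-1);
-- objective: alternative — no dict or per-URL lists are built.

-- ===== PORT A =====
-- entry["url"]; Pre_ guarantees the key is present, so the default "" is never used
def pvUrl (e : List (String × String)) : String := ((PySem.Dict.mk e).get? "url").getD ""

-- A's second loop: for entries in by_url.values(): break when full, else append entries[0]
def pvPickLoop (min_required : Int) : List (List (List (String × String))) → List (List (String × String)) → List (List (String × String))
  | [], acc => acc
  | v :: rest, acc =>
      if (acc.length : Int) ≥ min_required then acc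
      else pvPickLoop min_required rest (acc ++ [PySem.List.pyGetD v 0 []])

def get_diverse_documents (scored_docs : List (List (String × String))) (min_required : Int) : List (List (String × String)) :=
  let by_url := scored_docs.foldl (fun d e => d.modify (pvUrl e) [] (fun v => v ++ [e])) PySem.Dict.empty
  pvPickLoop min_required by_url.values []

-- ===== PORT B =====
-- B: if min_required <= 0 or scored_docs empty return []; otherwise keep the head,
-- filter later entries with the head's URL out of the tail, recurse with min_required - 1.
def get_diverse_documents_alt (scored_docs : List (List (String × String))) (min_required : Int) : List (List (String × String)) :=
  if min_required ≤ 0 then []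
  else
    match scored_docs with
    | [] => []
    | first :: rest =>
        let remaining := rest.filter (fun e => pvUrl e != pvUrl first)
        first :: get_diverse_documents_alt remaining (min_required - 1)
termination_by scored_docs.length
decreasing_by
  simp only [List.length_cons, List.length_unattach]
  exact Nat.lt_succ_of_le (le_trans (List.length_filter_le _ _) (by simp))

-- ===== PRECONDITION & SPEC =====
-- Pre_ excludes exactly the inputs where Python A raises KeyError: an entry without the "url" key.
def Pre_get_diverse_documents (scored_docs : List (List (String × String))) (min_required : Int) : Prop :=
  ∀ e ∈ scored_docs, (PySem.Dict.mk e).contains "url" = true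
instance (scored_docs : List (List (String × String))) (min_required : Int) : Decidable (Pre_get_diverse_documents scored_docs min_required) := by unfold Pre_get_diverse_documents; infer_instance

def pvWitness_get_diverse_documents : (List (List (String × String))) × Int :=
  ([[("url", "a"), ("t", "x")], [("url", "b")], [("url", "a"), ("t", "y")]], 2)

def Spec_get_diverse_documents (scored_docs : List (List (String × String))) (min_required : Int) (out : List (List (String × String))) : Prop := out = get_diverse_documents_alt scored_docs min_required
instance (scored_docs : List (List (String × String))) (min_required : Int) (out : List (List (String × String))) : Decidable (Spec_get_diverse_documents scored_docs min_required out) := by unfold Spec_get_diverse_documents; infer_instance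

-- ===== CLAIM (what is proved, stated in full; the proofs are below) =====
def Claim_equal_get_diverse_documents : Prop := ∀ (scored_docs : List (List (String × String))) (min_required : Int), Dom_get_diverse_documents scored_docs min_required → Pre_get_diverse_documents scored_docs min_required → Spec_get_diverse_documents scored_docs min_required (get_diverse_documents scored_docs min_required)

-- ===== LEMMAS AND PROOFS =====

-- the first entry of a (nonempty by construction) group
def pvHd (v : List (List (String × String))) : List (String × String) := PySem.List.pyGetD v 0 []

-- the common abstraction: first occurrence per URL, in order, given already-seen urls
def pvFirsts : List (List (String × String)) → List String → List (List (String × String))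
  | [], _ => []
  | e :: l, s => if pvUrl e ∈ s then pvFirsts l s else e :: pvFirsts l (pvUrl e :: s)

theorem pvFirsts_congr (l : List (List (String × String))) : ∀ s s' : List String,
    (∀ a, a ∈ s ↔ a ∈ s') → pvFirsts l s = pvFirsts l s' := by
  induction l with
  | nil => intro s s' _; rfl
  | cons e l ih =>
      intro s s' h
      simp only [pvFirsts]
      by_cases hm : pvUrl e ∈ s
      · rw [if_pos hm, if_pos ((h _).1 hm), ih s s' h]
      · rw [if_neg hm, if_neg (fun hc => hm ((h _).2 hc)),
          ih (pvUrl e :: s) (pvUrl e :: s') (by intro a; simp [h a])]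

theorem pvPickLoop_eq (m : Int) (vs : List (List (List (String × String)))) :
    ∀ acc, pvPickLoop m vs acc = acc ++ (vs.map pvHd).take (m.toNat - acc.length) := by
  induction vs with
  | nil => intro acc; simp [pvPickLoop]
  | cons v rest ih =>
      intro acc
      simp only [pvPickLoop, List.map]
      by_cases h : (acc.length : Int) ≥ m
      · rw [if_pos h]
        have : m.toNat - acc.length = 0 := by omega
        simp [this]
      · rw [if_neg h, ih]
        have h1 : m.toNat - acc.length = (m.toNat - (acc ++ [pvHd v]).length) + 1 := by
          simp; omega
        rw [h1, List.take_succ_cons]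
        simp [pvHd]

theorem pvHd_append (v : List (List (String × String))) (e : List (String × String)) (h : v ≠ []) :
    pvHd (v ++ [e]) = pvHd v := by
  cases v with
  | nil => exact absurd rfl h
  | cons a t => simp [pvHd, PySem.List.pyGetD_zero_cons]

theorem pvValues_map_hd (d : PySem.Dict String (List (List (String × String)))) (h : d.keys.Nodup) :
    d.values.map pvHd = d.keys.map (fun k => pvHd (d.getD k [])) := by
  simp only [PySem.Dict.keys, PySem.Dict.values, List.map_map]
  apply List.map_congr_left
  intro p hp
  have := PySem.Dict.getD_of_mem_items d (k := p.1) (v := p.2) (by simpa using hp) h ([])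
  simp [this]

theorem pvBuild_heads (l : List (List (String × String))) :
    ∀ (d : PySem.Dict String (List (List (String × String)))),
      d.keys.Nodup → (∀ k ∈ d.keys, d.getD k [] ≠ []) →
      (l.foldl (fun d e => d.modify (pvUrl e) [] (fun v => v ++ [e])) d).keys.map
          (fun k => pvHd ((l.foldl (fun d e => d.modify (pvUrl e) [] (fun v => v ++ [e])) d).getD k []))
        = d.keys.map (fun k => pvHd (d.getD k [])) ++ pvFirsts l d.keys := by
  induction l with
  | nil => intro d _ _; simp [pvFirsts]
  | cons e l ih =>
      intro d hnd hne
      simp only [List.foldl_cons, pvFirsts]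
      set u := pvUrl e with hu
      by_cases hc : d.contains u = true
      · -- existing url: keys unchanged, head of the group unchanged
        have hmem : u ∈ d.keys := (PySem.Dict.contains_iff_mem_keys d u).1 hc
        have hkeys : (d.modify u [] (fun v => v ++ [e])).keys = d.keys := by
          rw [PySem.Dict.keys_modify, PySem.Dict.keys_insert_of_contains d _ hc]
        rw [ih (d.modify u [] (fun v => v ++ [e]))
            (by rw [hkeys]; exact hnd)
            (by
              intro k hk
              rw [hkeys] at hk
              rw [PySem.Dict.getD_modify]
              split_ifs with hk'
              · subst hk'; simp
              · exact hne k hk)]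
        rw [hkeys, if_pos hmem]
        congr 1
        apply List.map_congr_left
        intro k hk
        rw [PySem.Dict.getD_modify]
        split_ifs with hk'
        · rw [hk', pvHd_append _ _ (hne u hmem)]
        · rfl
      · -- new url: key appended at the end, its group is [e]
        have hmem : u ∉ d.keys := fun hm => hc ((PySem.Dict.contains_iff_mem_keys d u).2 hm)
        have hcf : d.contains u = false := by simpa using hc
        have hkeys : (d.modify u [] (fun v => v ++ [e])).keys = d.keys ++ [u] := by
          rw [PySem.Dict.keys_modify, PySem.Dict.keys_insert_of_not_contains d _ hcf]
        rw [ih (d.modify u [] (fun v => v ++ [e]))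
            (by rw [hkeys]; simp [List.nodup_append, hnd]; exact fun a ha h => hmem (h ▸ ha))
            (by
              intro k hk
              rw [hkeys] at hk
              rw [PySem.Dict.getD_modify]
              split_ifs with hk'
              · simp
              · exact hne k (by
                  rcases List.mem_append.1 hk with h' | h'
                  · exact h'
                  · exact absurd (List.mem_singleton.1 h') hk'))]
        rw [hkeys, if_neg hmem,
          pvFirsts_congr l (d.keys ++ [u]) (u :: d.keys) (by intro a; simp; tauto)]
        rw [List.map_append]
        have hgu : (d.modify u [] (fun v => v ++ [e])).getD u [] = [e] := by
          rw [PySem.Dict.getD_modify_self, PySem.Dict.getD_of_not_contains d _ hcf]; rfl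
        have : (d.keys.map fun k => pvHd ((d.modify u [] (fun v => v ++ [e])).getD k []))
            = d.keys.map (fun k => pvHd (d.getD k [])) := by
          apply List.map_congr_left
          intro k hk
          rw [PySem.Dict.getD_modify_of_ne d _ _ (fun h : k = u => hmem (h ▸ hk))]
        rw [this]
        simp [hgu, pvHd, PySem.List.pyGetD_zero_cons]

-- filtering out a seen url = moving it into the seen set
theorem pvFirsts_filter (l : List (List (String × String))) : ∀ (u : String) (s : List String),
    pvFirsts (l.filter (fun e => pvUrl e != u)) s = pvFirsts l (u :: s) := by
  induction l with
  | nil => intro u s; rfl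
  | cons e l ih =>
      intro u s
      by_cases he : pvUrl e = u
      · rw [List.filter_cons_of_neg (by simp [he])]
        simp only [pvFirsts, he]
        rw [if_pos (List.mem_cons_self), ih]
      · rw [List.filter_cons_of_pos (by simp [he])]
        simp only [pvFirsts]
        by_cases hm : pvUrl e ∈ s
        · rw [if_pos hm, if_pos (List.mem_cons_of_mem _ hm), ih]
        · rw [if_neg hm, if_neg (by simp [he, hm]), ih,
            pvFirsts_congr l (u :: pvUrl e :: s) (pvUrl e :: u :: s) (by intro a; simp; tauto)]

-- B computes the first min_required first-per-URL entries
theorem pvAlt_eq_take (n : Nat) : ∀ (l : List (List (String × String))) (m : Int), l.length ≤ n →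
    get_diverse_documents_alt l m = (pvFirsts l []).take m.toNat := by
  induction n with
  | zero =>
      intro l m hl
      have : l = [] := List.eq_nil_of_length_eq_zero (Nat.le_zero.1 hl)
      subst this
      rw [get_diverse_documents_alt.eq_def]
      simp [pvFirsts]
  | succ n ih =>
      intro l m hl
      rw [get_diverse_documents_alt.eq_def]
      by_cases hm : m ≤ 0
      · rw [if_pos hm]
        have : m.toNat = 0 := by omega
        simp [this]
      · rw [if_neg hm]
        cases l with
        | nil => simp [pvFirsts]
        | cons e l =>
            simp only
            rw [ih (l.filter (fun x => pvUrl x != pvUrl e)) (m - 1)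
              (le_trans (List.length_filter_le _ _) (by simpa using Nat.lt_succ_iff.1 (by simpa using hl)))]
            rw [pvFirsts_filter]
            have hfe : pvFirsts (e :: l) [] = e :: pvFirsts l [pvUrl e] := by
              simp [pvFirsts]
            rw [hfe]
            have hmn : m.toNat = (m - 1).toNat + 1 := by omega
            rw [hmn, List.take_succ_cons]

-- ===== VERDICT (by name: the statement is the Claim_ definition above) =====
theorem get_diverse_documents_spec : Claim_equal_get_diverse_documents := by
  intro scored_docs min_required _ _
  unfold Spec_get_diverse_documents get_diverse_documents
  have hnd : (scored_docs.foldl (fun d e => d.modify (pvUrl e) [] (fun v => v ++ [e]))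
      PySem.Dict.empty).keys.Nodup :=
    PySem.Dict.nodup_keys_foldl_modify_key scored_docs pvUrl [] (fun _ e v => v ++ [e]) _
      PySem.Dict.nodup_keys_empty
  rw [pvPickLoop_eq, pvValues_map_hd _ hnd,
    pvAlt_eq_take scored_docs.length scored_docs min_required le_rfl]
  simp only [List.nil_append, List.length_nil, Nat.sub_zero]
  have := pvBuild_heads scored_docs PySem.Dict.empty PySem.Dict.nodup_keys_empty
      (by simp [PySem.Dict.keys_empty])
  rw [PySem.Dict.keys_empty] at this
  simp only [List.map_nil, List.nil_append] at this
  rw [this]
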